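-- pv_equiv track=rewrite | github.com/dicksarp09/APRIS | app/nodes/workflow_nodes.py | _generate_red_flags
-- ===== SOURCE A (Python) =====
-- def _generate_red_flags(
--     file_summaries: dict, dependencies: dict, config_info: dict
-- ) -> str:
--     """Generate red flags / warnings"""
--
--     py_files = [
--         f.replace("\\", "/") for f in file_summaries.keys() if f.endswith(".py")
--     ]
--
--     flags = []
--
--     # Check for duplication
--     backend_retrieval = [
--         f for f in py_files if "hybrid" in f.lower() and "/backend/" in f
--     ]
--     script_retrieval = [
--         f for f in py_files if "hybrid" in f.lower() and "/scripts/" in f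
--     ]
--     if backend_retrieval and script_retrieval:
--         flags.append(
--             f"Duplicate retrieval logic: found in both backend/ and scripts/"
--         )
--
--     # Check for utility files
--     utility_count = sum(1 for f in py_files if "util" in f.lower())
--     if utility_count > 5:
--         flags.append(
--             f"High number of utility files ({utility_count}) - consider consolidation"
--         )
--
--     # Check for missing observability
--     obs_count = sum(
--         1
--         for f in py_files
--         if any(x in f.lower() for x in ["tracing", "logging", "langsmith"])
--     )
--     if obs_count == 0 and len(py_files) > 10:
--         flags.append(
--             "No observability/tracing detected - runtime debugging will be difficult"
--         )
--
--     # Check for missing tests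
--     test_count = sum(1 for f in py_files if "test" in f.lower())
--     if test_count == 0 and len(py_files) > 5:
--         flags.append("No tests detected - risky for production")
--
--     # Check for hardcoded secrets (heuristic)
--     secrets_keywords = ["password", "api_key", "secret", "token"]
--     # Note: This is just a warning, we'd need actual content analysis
--
--     # Check for monolithic tendency
--     main_files = [
--         f for f in py_files if f.endswith("main.py") or f.endswith("__init__.py")
--     ]
--     if len(main_files) > 3:
--         flags.append(
--             f"Multiple entry points ({len(main_files)}) - may indicate unclear architecture"
--         )
--
--     doc = "## Red Flags\n\n"
--
--     if flags:
--         for flag in flags: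
--             doc += f"- ⚠️ {flag}\n"
--     else:
--         doc += "- ✅ No major issues detected\n"
--
--     doc += "\n"
--
--     return doc
-- ===== SOURCE B (Python) =====
-- def _generate_red_flags(
--     file_summaries: dict, dependencies: dict, config_info: dict
-- ) -> str:
--     """Generate red flags / warnings (single accumulating pass instead of repeated scans)"""
--
--     has_backend = False
--     has_script = False
--     utility_count = 0
--     obs_count = 0
--     test_count = 0
--     main_count = 0
--     n = 0
--
--     for f0 in file_summaries.keys():
--         if not f0.endswith(".py"):
--             continue
--         f = f0.replace("\\", "/")
--         fl = f.lower()
--         n += 1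
--         if "hybrid" in fl and "/backend/" in f:
--             has_backend = True
--         if "hybrid" in fl and "/scripts/" in f:
--             has_script = True
--         if "util" in fl:
--             utility_count += 1
--         if "tracing" in fl or "logging" in fl or "langsmith" in fl:
--             obs_count += 1
--         if "test" in fl:
--             test_count += 1
--         if f.endswith("main.py") or f.endswith("__init__.py"):
--             main_count += 1
--
--     flags = []
--     if has_backend and has_script:
--         flags.append("Duplicate retrieval logic: found in both backend/ and scripts/")
--     if utility_count > 5:
--         flags.append(f"High number of utility files ({utility_count}) - consider consolidation")
--     if obs_count == 0 and n > 10: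
--         flags.append("No observability/tracing detected - runtime debugging will be difficult")
--     if test_count == 0 and n > 5:
--         flags.append("No tests detected - risky for production")
--     if main_count > 3:
--         flags.append(f"Multiple entry points ({main_count}) - may indicate unclear architecture")
--
--     body = "".join(f"- \u26a0\ufe0f {flag}\n" for flag in flags) if flags else "- \u2705 No major issues detected\n"
--     return "## Red Flags\n\n" + body + "\n"
-- ===== Notes on version B (the rewrite author's own statement) =====
-- stated objective: alternative
-- what changed: B replaces A's six separate scans over py_files (two filter comprehensions, three sum-generators, one filter for entry points) by one accumulating pass over the keys that maintains two booleans and five counters, then applies the same threshold tests.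
import Mathlib
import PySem

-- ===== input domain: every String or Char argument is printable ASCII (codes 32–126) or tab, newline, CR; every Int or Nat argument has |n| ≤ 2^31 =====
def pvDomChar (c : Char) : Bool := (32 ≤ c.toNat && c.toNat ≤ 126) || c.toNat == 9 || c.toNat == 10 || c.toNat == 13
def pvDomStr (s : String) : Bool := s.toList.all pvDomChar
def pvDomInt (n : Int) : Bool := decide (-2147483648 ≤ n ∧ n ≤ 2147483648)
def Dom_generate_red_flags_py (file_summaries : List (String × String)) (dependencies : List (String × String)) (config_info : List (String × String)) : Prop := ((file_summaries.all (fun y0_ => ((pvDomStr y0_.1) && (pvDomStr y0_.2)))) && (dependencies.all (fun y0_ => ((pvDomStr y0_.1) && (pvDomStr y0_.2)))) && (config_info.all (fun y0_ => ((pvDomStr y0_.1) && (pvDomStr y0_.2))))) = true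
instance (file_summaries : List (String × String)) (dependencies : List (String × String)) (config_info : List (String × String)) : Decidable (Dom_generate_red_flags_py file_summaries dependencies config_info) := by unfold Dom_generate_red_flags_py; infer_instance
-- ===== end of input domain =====

-- B replaces A's six separate scans over py_files by one accumulating pass over the
-- dict keys maintaining two booleans and five counters (alternative decomposition).

-- ===== PORT A =====
def generate_red_flags_py (file_summaries : List (String × String)) (dependencies : List (String × String)) (config_info : List (String × String)) : String :=
  let py_files : List String :=
    ((PySem.List.dedup (file_summaries.map Prod.fst)).filter
      (fun f => PySem.Str.endswith f ".py")).map
      (fun f => PySem.Str.replace f "\\" "/")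
  let flags : List String := []
  let backend_retrieval := py_files.filter
    (fun f => PySem.Str.isIn "hybrid" (PySem.Str.lower f) && PySem.Str.isIn "/backend/" f)
  let script_retrieval := py_files.filter
    (fun f => PySem.Str.isIn "hybrid" (PySem.Str.lower f) && PySem.Str.isIn "/scripts/" f)
  let flags := if !backend_retrieval.isEmpty && !script_retrieval.isEmpty then
      flags ++ ["Duplicate retrieval logic: found in both backend/ and scripts/"]
    else flags
  let utility_count : Int := ((py_files.countP (fun f => PySem.Str.isIn "util" (PySem.Str.lower f)) : Nat) : Int)
  let flags := if utility_count > 5 then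
      flags ++ ["High number of utility files (" ++ PySem.Int.toStr utility_count ++ ") - consider consolidation"]
    else flags
  let obs_count : Int := ((py_files.countP (fun f =>
      (["tracing", "logging", "langsmith"]).any (fun x => PySem.Str.isIn x (PySem.Str.lower f))) : Nat) : Int)
  let flags := if obs_count == 0 && (py_files.length : Int) > 10 then
      flags ++ ["No observability/tracing detected - runtime debugging will be difficult"]
    else flags
  let test_count : Int := ((py_files.countP (fun f => PySem.Str.isIn "test" (PySem.Str.lower f)) : Nat) : Int)
  let flags := if test_count == 0 && (py_files.length : Int) > 5 then
      flags ++ ["No tests detected - risky for production"]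
    else flags
  let main_files := py_files.filter
    (fun f => PySem.Str.endswith f "main.py" || PySem.Str.endswith f "__init__.py")
  let flags := if (main_files.length : Int) > 3 then
      flags ++ ["Multiple entry points (" ++ PySem.Int.toStr (main_files.length : Int) ++ ") - may indicate unclear architecture"]
    else flags
  let doc := "## Red Flags\n\n"
  let doc := if !flags.isEmpty then
      flags.foldl (fun d flag => d ++ ("- ⚠️ " ++ flag ++ "\n")) doc
    else doc ++ "- ✅ No major issues detected\n"
  doc ++ "\n"

-- ===== PORT B =====
-- accumulator: (has_backend, has_script, utility_count, obs_count, test_count, main_count, n)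
def redflagsStep (acc : Bool × Bool × Int × Int × Int × Int × Int) (f0 : String) :
    Bool × Bool × Int × Int × Int × Int × Int :=
  if !(PySem.Str.endswith f0 ".py") then acc
  else
    let f := PySem.Str.replace f0 "\\" "/"
    let fl := PySem.Str.lower f
    let (hb, hs, u, o, t, m, n) := acc
    ((if PySem.Str.isIn "hybrid" fl && PySem.Str.isIn "/backend/" f then true else hb),
     (if PySem.Str.isIn "hybrid" fl && PySem.Str.isIn "/scripts/" f then true else hs),
     (if PySem.Str.isIn "util" fl then u + 1 else u),
     (if PySem.Str.isIn "tracing" fl || PySem.Str.isIn "logging" fl || PySem.Str.isIn "langsmith" fl then o + 1 else o),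
     (if PySem.Str.isIn "test" fl then t + 1 else t),
     (if PySem.Str.endswith f "main.py" || PySem.Str.endswith f "__init__.py" then m + 1 else m),
     n + 1)

def generate_red_flags_py_alt (file_summaries : List (String × String)) (dependencies : List (String × String)) (config_info : List (String × String)) : String :=
  let st := (PySem.List.dedup (file_summaries.map Prod.fst)).foldl redflagsStep
              (false, false, 0, 0, 0, 0, 0)
  let (hb, hs, u, o, t, m, n) := st
  let flags : List String := []
  let flags := if hb && hs then
      flags ++ ["Duplicate retrieval logic: found in both backend/ and scripts/"]
    else flags
  let flags := if u > 5 then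
      flags ++ ["High number of utility files (" ++ PySem.Int.toStr u ++ ") - consider consolidation"]
    else flags
  let flags := if o == 0 && n > 10 then
      flags ++ ["No observability/tracing detected - runtime debugging will be difficult"]
    else flags
  let flags := if t == 0 && n > 5 then
      flags ++ ["No tests detected - risky for production"]
    else flags
  let flags := if m > 3 then
      flags ++ ["Multiple entry points (" ++ PySem.Int.toStr m ++ ") - may indicate unclear architecture"]
    else flags
  let body := if !flags.isEmpty then
      flags.foldl (fun d flag => d ++ ("- ⚠️ " ++ flag ++ "\n")) ""
    else "- ✅ No major issues detected\n"
  "## Red Flags\n\n" ++ body ++ "\n"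

-- ===== PRECONDITION & SPEC =====
def Spec_generate_red_flags_py (file_summaries : List (String × String)) (dependencies : List (String × String)) (config_info : List (String × String)) (out : String) : Prop := out = generate_red_flags_py_alt file_summaries dependencies config_info
instance (file_summaries : List (String × String)) (dependencies : List (String × String)) (config_info : List (String × String)) (out : String) : Decidable (Spec_generate_red_flags_py file_summaries dependencies config_info out) := by unfold Spec_generate_red_flags_py; infer_instance

-- ===== CLAIM (what is proved, stated in full; the proofs are below) =====
def Claim_equal_generate_red_flags_py : Prop := ∀ (file_summaries : List (String × String)) (dependencies : List (String × String)) (config_info : List (String × String)), Dom_generate_red_flags_py file_summaries dependencies config_info → Spec_generate_red_flags_py file_summaries dependencies config_info (generate_red_flags_py file_summaries dependencies config_info)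

-- ===== LEMMAS AND PROOFS =====

-- A's py_files, as a function of the key list
def pyFilesOf (l : List String) : List String :=
  (l.filter (fun f => PySem.Str.endswith f ".py")).map (fun f => PySem.Str.replace f "\\" "/")

def pbBackend (f : String) : Bool := PySem.Str.isIn "hybrid" (PySem.Str.lower f) && PySem.Str.isIn "/backend/" f
def pbScript (f : String) : Bool := PySem.Str.isIn "hybrid" (PySem.Str.lower f) && PySem.Str.isIn "/scripts/" f
def pbUtil (f : String) : Bool := PySem.Str.isIn "util" (PySem.Str.lower f)
def pbObs (f : String) : Bool := (["tracing", "logging", "langsmith"]).any (fun x => PySem.Str.isIn x (PySem.Str.lower f))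
def pbTest (f : String) : Bool := PySem.Str.isIn "test" (PySem.Str.lower f)
def pbMain (f : String) : Bool := PySem.Str.endswith f "main.py" || PySem.Str.endswith f "__init__.py"

lemma redflags_foldl_spec (l : List String) (hb hs : Bool) (u o t m n : Int) :
    l.foldl redflagsStep (hb, hs, u, o, t, m, n) =
      (hb || (pyFilesOf l).any pbBackend,
       hs || (pyFilesOf l).any pbScript,
       u + ((pyFilesOf l).countP pbUtil : Int),
       o + ((pyFilesOf l).countP pbObs : Int),
       t + ((pyFilesOf l).countP pbTest : Int),
       m + ((pyFilesOf l).countP pbMain : Int),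
       n + ((pyFilesOf l).length : Int)) := by
  induction l generalizing hb hs u o t m n with
  | nil => simp [pyFilesOf]
  | cons x xs ih =>
    by_cases hx : PySem.Str.endswith x ".py" = true
    · have hstep : redflagsStep (hb, hs, u, o, t, m, n) x =
        ((if pbBackend (PySem.Str.replace x "\\" "/") then true else hb),
         (if pbScript (PySem.Str.replace x "\\" "/") then true else hs),
         (if pbUtil (PySem.Str.replace x "\\" "/") then u + 1 else u),
         (if pbObs (PySem.Str.replace x "\\" "/") then o + 1 else o),
         (if pbTest (PySem.Str.replace x "\\" "/") then t + 1 else t),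
         (if pbMain (PySem.Str.replace x "\\" "/") then m + 1 else m),
         n + 1) := by
        unfold redflagsStep
        rw [hx]
        simp only [Bool.not_true, Bool.false_eq_true, if_false, pbBackend, pbScript,
          pbUtil, pbObs, pbTest, pbMain, List.any_cons, List.any_nil, Bool.or_false,
          Bool.or_assoc]
        rfl
      have hpf : pyFilesOf (x :: xs) = PySem.Str.replace x "\\" "/" :: pyFilesOf xs := by
        simp only [pyFilesOf, List.filter_cons, hx, if_true, List.map_cons]
      rw [List.foldl_cons, hstep, ih, hpf]
      simp only [List.any_cons, List.countP_cons, List.length_cons]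
      cases h1 : pbBackend (PySem.Str.replace x "\\" "/") <;>
      cases h2 : pbScript (PySem.Str.replace x "\\" "/") <;>
      cases h3 : pbUtil (PySem.Str.replace x "\\" "/") <;>
      cases h4 : pbObs (PySem.Str.replace x "\\" "/") <;>
      cases h5 : pbTest (PySem.Str.replace x "\\" "/") <;>
      cases h6 : pbMain (PySem.Str.replace x "\\" "/") <;>
        simp only [h1, h2, h3, h4, h5, h6, if_true, if_false, Bool.false_eq_true,
          Bool.true_or, Bool.false_or, Bool.or_true, Bool.or_false, Prod.mk.injEq,
          Bool.true_eq_false, Bool.false_eq_true, true_and, and_true] <;>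
        push_cast <;> omega
    · simp only [Bool.not_eq_true] at hx
      have hstep : redflagsStep (hb, hs, u, o, t, m, n) x = (hb, hs, u, o, t, m, n) := by
        unfold redflagsStep
        rw [hx]
        simp only [Bool.not_false, if_true]
      have hpf : pyFilesOf (x :: xs) = pyFilesOf xs := by
        simp only [pyFilesOf, List.filter_cons, hx, Bool.false_eq_true, if_false]
      rw [List.foldl_cons, hstep, ih, hpf]

lemma filter_isEmpty_eq_not_any (l : List String) (p : String → Bool) :
    (l.filter p).isEmpty = !(l.any p) := by
  induction l with
  | nil => simp
  | cons x xs ih => by_cases hx : p x = true <;> simp [hx, ih]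

lemma foldl_append_start (g : String → String) (flags : List String) (d : String) :
    flags.foldl (fun d flag => d ++ g flag) d =
      d ++ flags.foldl (fun d flag => d ++ g flag) "" := by
  induction flags generalizing d with
  | nil => simp
  | cons x xs ih =>
    rw [List.foldl_cons, List.foldl_cons, ih, ih ("" ++ g x)]
    simp [String.append_assoc]

-- ===== VERDICT (by name: the statement is the Claim_ definition above) =====
set_option maxHeartbeats 1000000 in
theorem generate_red_flags_py_spec : Claim_equal_generate_red_flags_py := by
  intro fs dep cfg _
  show generate_red_flags_py fs dep cfg = generate_red_flags_py_alt fs dep cfg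
  unfold generate_red_flags_py generate_red_flags_py_alt
  rw [redflags_foldl_spec]
  have e0 : ((PySem.List.dedup (fs.map Prod.fst)).filter
      (fun f => PySem.Str.endswith f ".py")).map (fun f => PySem.Str.replace f "\\" "/") =
      pyFilesOf (PySem.List.dedup (fs.map Prod.fst)) := rfl
  have e1 : (fun f => PySem.Str.isIn "hybrid" (PySem.Str.lower f) && PySem.Str.isIn "/backend/" f) = pbBackend := rfl
  have e2 : (fun f => PySem.Str.isIn "hybrid" (PySem.Str.lower f) && PySem.Str.isIn "/scripts/" f) = pbScript := rfl
  have e3 : (fun f => PySem.Str.isIn "util" (PySem.Str.lower f)) = pbUtil := rfl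
  have e4 : (fun f => (["tracing", "logging", "langsmith"]).any (fun x => PySem.Str.isIn x (PySem.Str.lower f))) = pbObs := rfl
  have e5 : (fun f => PySem.Str.isIn "test" (PySem.Str.lower f)) = pbTest := rfl
  have e6 : (fun f => PySem.Str.endswith f "main.py" || PySem.Str.endswith f "__init__.py") = pbMain := rfl
  rw [e0, e1, e2, e3, e4, e5, e6]
  simp only [Bool.false_or, zero_add, filter_isEmpty_eq_not_any, Bool.not_not,
    List.countP_eq_length_filter]
  set pf := pyFilesOf (PySem.List.dedup (fs.map Prod.fst)) with hpf
  set flags := (if pf.any pbBackend && pf.any pbScript then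
      ([] : List String) ++ ["Duplicate retrieval logic: found in both backend/ and scripts/"]
    else []) with hflags
  split_ifs <;>
    first
      | rfl
      | (rw [foldl_append_start (fun flag => "- ⚠️ " ++ flag ++ "\n")]
         try simp [String.append_assoc])
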